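-- pv_equiv track=rewrite | github.com/GenomicsStandardsConsortium/mixs | src/scripts/extension_slot_diffrences.py | compare_slots_by_extension
-- ===== SOURCE A (Python) =====
-- def compare_slots_by_extension(ext_slot_pairings, ext1, ext2):
--     """
--     Compares slots for two extensions in a list of dictionaries.
--
--     Args:
--       ext_slot_pairings: A list of dictionaries, each with "extension" and "slot" keys.
--       ext1: The first extension to compare.
--       ext2: The second extension to compare.
--
--     Returns:
--       A dictionary with two keys:
--         - ext1_only: A list of slots unique to the first extension.
--         - ext2_only: A list of slots unique to the second extension.
--     """
--     ext1_slots = set()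
--     ext2_slots = set()
--     for item in ext_slot_pairings:
--         if item["extension"] == ext1:
--             ext1_slots.add(item["slot"])
--         elif item["extension"] == ext2:
--             ext2_slots.add(item["slot"])
--
--     return {
--         f"{ext1}_only": sorted(list(ext1_slots - ext2_slots)),
--         f"{ext2}_only": sorted(list(ext2_slots - ext1_slots)),
--         f"intersection": sorted(ext1_slots.intersection(ext2_slots)),
--     }
-- ===== SOURCE B (Python) =====
-- def compare_slots_by_extension(ext_slot_pairings, ext1, ext2):
--     # Stage 1: sorted lists of the distinct slots per extension
--     # (the "!= ext1" conjunct keeps the original elif dispatch).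
--     s1 = sorted({item["slot"] for item in ext_slot_pairings
--                  if item["extension"] == ext1})
--     s2 = sorted({item["slot"] for item in ext_slot_pairings
--                  if item["extension"] != ext1 and item["extension"] == ext2})
--     # Stage 2: two-pointer merge of the two sorted lists into the three
--     # buckets; the outputs come out sorted by construction, no set algebra.
--     only1, only2, both = [], [], []
--     i = j = 0
--     while i < len(s1) and j < len(s2):
--         if s1[i] < s2[j]:
--             only1.append(s1[i]); i += 1
--         elif s2[j] < s1[i]:
--             only2.append(s2[j]); j += 1
--         else:
--             both.append(s1[i]); i += 1; j += 1
--     only1.extend(s1[i:])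
--     only2.extend(s2[j:])
--     return {f"{ext1}_only": only1, f"{ext2}_only": only2, "intersection": both}
-- ===== Notes on version B (the rewrite author's own statement) =====
-- stated objective: alternative
-- what changed: B first builds the two sorted distinct slot lists per extension and then classifies by a two-pointer merge of the sorted lists, producing the three buckets already in order, instead of set difference/intersection followed by sorting.
import Mathlib
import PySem

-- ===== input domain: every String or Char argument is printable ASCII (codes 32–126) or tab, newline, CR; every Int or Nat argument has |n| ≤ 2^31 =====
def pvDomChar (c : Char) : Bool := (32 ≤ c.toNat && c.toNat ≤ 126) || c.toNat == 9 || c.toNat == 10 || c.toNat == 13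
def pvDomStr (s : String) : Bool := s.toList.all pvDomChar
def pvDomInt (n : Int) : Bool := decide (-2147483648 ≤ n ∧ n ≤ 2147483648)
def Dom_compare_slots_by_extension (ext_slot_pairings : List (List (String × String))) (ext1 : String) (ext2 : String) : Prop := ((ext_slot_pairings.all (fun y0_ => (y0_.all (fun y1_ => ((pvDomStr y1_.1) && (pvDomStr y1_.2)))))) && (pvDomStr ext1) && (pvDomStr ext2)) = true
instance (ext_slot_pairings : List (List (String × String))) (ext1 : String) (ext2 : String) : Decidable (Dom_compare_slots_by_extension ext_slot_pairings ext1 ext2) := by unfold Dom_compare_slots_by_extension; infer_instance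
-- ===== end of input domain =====

-- B builds the two sorted distinct slot lists per extension and classifies them by a
-- two-pointer merge (buckets come out sorted by construction), instead of two sets,
-- set difference/intersection and a final sort (objective: alternative).

-- ===== PORT A =====
-- loop body of A: if item["extension"]==ext1: s1.add(item["slot"]) elif ==ext2: s2.add(item["slot"])
def pvStepA (ext1 ext2 : String) (st : PySem.Set String × PySem.Set String) (item : List (String × String)) : PySem.Set String × PySem.Set String :=
  if (PySem.Dict.ofList item).getD "extension" "" = ext1 then
    (PySem.Set.add st.1 ((PySem.Dict.ofList item).getD "slot" ""), st.2)
  else if (PySem.Dict.ofList item).getD "extension" "" = ext2 then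
    (st.1, PySem.Set.add st.2 ((PySem.Dict.ofList item).getD "slot" ""))
  else st

def compare_slots_by_extension (ext_slot_pairings : List (List (String × String))) (ext1 : String) (ext2 : String) : List (String × List String) :=
  let st := ext_slot_pairings.foldl (pvStepA ext1 ext2) (PySem.Set.empty, PySem.Set.empty)
  (((PySem.Dict.empty.insert (ext1 ++ "_only") (PySem.List.sorted (PySem.Set.diff st.1 st.2) (fun x => x) false)).insert
      (ext2 ++ "_only") (PySem.List.sorted (PySem.Set.diff st.2 st.1) (fun x => x) false)).insert
      "intersection" (PySem.List.sorted (PySem.Set.inter st.1 st.2) (fun x => x) false)).items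

-- ===== PORT B =====
-- the two set comprehensions of B, then sorted(...)
def pvSorted1 (ext_slot_pairings : List (List (String × String))) (ext1 : String) : List String :=
  PySem.List.sorted
    (PySem.Set.ofList ((ext_slot_pairings.filter
        (fun item => (PySem.Dict.ofList item).getD "extension" "" = ext1)).map
      (fun item => (PySem.Dict.ofList item).getD "slot" ""))) (fun x => x) false

def pvSorted2 (ext_slot_pairings : List (List (String × String))) (ext1 ext2 : String) : List String :=
  PySem.List.sorted
    (PySem.Set.ofList ((ext_slot_pairings.filter
        (fun item => ¬ (PySem.Dict.ofList item).getD "extension" "" = ext1 ∧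
                     (PySem.Dict.ofList item).getD "extension" "" = ext2)).map
      (fun item => (PySem.Dict.ofList item).getD "slot" ""))) (fun x => x) false

-- the two-pointer merge loop of B (while i<len(s1) and j<len(s2): …; then the two extends)
def pvMerge : List String → List String → List String × List String × List String
  | [], ys => ([], ys, [])
  | x :: xs, [] => (x :: xs, [], [])
  | x :: xs, y :: ys =>
    if x < y then
      let r := pvMerge xs (y :: ys); (x :: r.1, r.2.1, r.2.2)
    else if y < x then
      let r := pvMerge (x :: xs) ys; (r.1, y :: r.2.1, r.2.2)
    else
      let r := pvMerge xs ys; (r.1, r.2.1, x :: r.2.2)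
termination_by xs ys => xs.length + ys.length
decreasing_by all_goals simp <;> omega

def compare_slots_by_extension_alt (ext_slot_pairings : List (List (String × String))) (ext1 : String) (ext2 : String) : List (String × List String) :=
  let s1 := pvSorted1 ext_slot_pairings ext1
  let s2 := pvSorted2 ext_slot_pairings ext1 ext2
  let r := pvMerge s1 s2
  (((PySem.Dict.empty.insert (ext1 ++ "_only") r.1).insert
      (ext2 ++ "_only") r.2.1).insert
      "intersection" r.2.2).items

-- ===== PRECONDITION & SPEC =====
-- Pre_ excludes exactly the inputs on which A raises KeyError: an item without an
-- "extension" key, or an item matching ext1/ext2 without a "slot" key.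
def Pre_compare_slots_by_extension (ext_slot_pairings : List (List (String × String))) (ext1 : String) (ext2 : String) : Prop :=
  ∀ item ∈ ext_slot_pairings,
    (PySem.Dict.ofList item).contains "extension" = true ∧
    (((PySem.Dict.ofList item).getD "extension" "" = ext1 ∨ (PySem.Dict.ofList item).getD "extension" "" = ext2) →
      (PySem.Dict.ofList item).contains "slot" = true)
instance (ext_slot_pairings : List (List (String × String))) (ext1 : String) (ext2 : String) : Decidable (Pre_compare_slots_by_extension ext_slot_pairings ext1 ext2) := by unfold Pre_compare_slots_by_extension; infer_instance

def pvWitness_compare_slots_by_extension : (List (List (String × String))) × String × String :=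
  ([[("extension", "e1"), ("slot", "a")], [("extension", "e2"), ("slot", "a")], [("extension", "e1"), ("slot", "b")]], "e1", "e2")

def Spec_compare_slots_by_extension (ext_slot_pairings : List (List (String × String))) (ext1 : String) (ext2 : String) (out : List (String × List String)) : Prop := out = compare_slots_by_extension_alt ext_slot_pairings ext1 ext2
instance (ext_slot_pairings : List (List (String × String))) (ext1 : String) (ext2 : String) (out : List (String × List String)) : Decidable (Spec_compare_slots_by_extension ext_slot_pairings ext1 ext2 out) := by unfold Spec_compare_slots_by_extension; infer_instance

-- ===== CLAIM (what is proved, stated in full; the proofs are below) =====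
def Claim_equal_compare_slots_by_extension : Prop := ∀ (ext_slot_pairings : List (List (String × String))) (ext1 : String) (ext2 : String), Dom_compare_slots_by_extension ext_slot_pairings ext1 ext2 → Pre_compare_slots_by_extension ext_slot_pairings ext1 ext2 → Spec_compare_slots_by_extension ext_slot_pairings ext1 ext2 (compare_slots_by_extension ext_slot_pairings ext1 ext2)

-- ===== LEMMAS AND PROOFS =====

-- A's fold is the two staged set-builds of B: each component collects exactly the
-- filtered-and-mapped slots of its branch.
lemma pv_foldA (ext1 ext2 : String) (pairs : List (List (String × String))) :
    ∀ s1 s2 : PySem.Set String,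
      pairs.foldl (pvStepA ext1 ext2) (s1, s2) =
        (PySem.Set.update s1 ((pairs.filter
            (fun item => decide ((PySem.Dict.ofList item).getD "extension" "" = ext1))).map
          (fun item => (PySem.Dict.ofList item).getD "slot" "")),
         PySem.Set.update s2 ((pairs.filter
            (fun item => decide (¬ (PySem.Dict.ofList item).getD "extension" "" = ext1 ∧
                     (PySem.Dict.ofList item).getD "extension" "" = ext2))).map
          (fun item => (PySem.Dict.ofList item).getD "slot" ""))) := by
  induction pairs with
  | nil => intro s1 s2; simp [PySem.Set.update]
  | cons item rest ih =>
    intro s1 s2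
    by_cases h1 : (PySem.Dict.ofList item).getD "extension" "" = ext1
    · simp only [List.foldl_cons, pvStepA, if_pos h1, List.filter_cons]
      rw [ih]
      simp [PySem.Set.update_cons, h1]
    · by_cases h2 : (PySem.Dict.ofList item).getD "extension" "" = ext2
      · have hne : ¬ ext2 = ext1 := fun h => h1 (h2.trans h)
        simp only [List.foldl_cons, pvStepA, if_neg h1, if_pos h2, List.filter_cons]
        rw [ih]
        simp [h2, hne, PySem.Set.update_cons]
      · simp only [List.foldl_cons, pvStepA, if_neg h1, if_neg h2, List.filter_cons]
        rw [ih]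
        simp [h1, h2]

-- the merge of two strictly increasing lists is the three membership filters
lemma pv_merge_eq (xs ys : List String) (hx : xs.Pairwise (· < ·)) (hy : ys.Pairwise (· < ·)) :
    pvMerge xs ys =
      (xs.filter (fun x => !decide (x ∈ ys)),
       ys.filter (fun y => !decide (y ∈ xs)),
       xs.filter (fun x => decide (x ∈ ys))) := by
  fun_induction pvMerge xs ys with
  | case1 ys => simp
  | case2 x xs => simp
  | case3 x xs y ys hlt r ih =>
    have hxy : ∀ z ∈ y :: ys, x < z := by
      intro z hz
      rcases List.mem_cons.mp hz with rfl | hz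
      · exact hlt
      · exact lt_trans hlt (List.rel_of_pairwise_cons hy hz)
    have hne : ∀ z ∈ y :: ys, z ≠ x := fun z hz h => absurd (h ▸ hxy z hz) (lt_irrefl _)
    have hxmem : x ∉ y :: ys := fun h => absurd (hxy x h) (lt_irrefl _)
    have c1 : (x :: xs).filter (fun z => !decide (z ∈ y :: ys))
        = x :: xs.filter (fun z => !decide (z ∈ y :: ys)) :=
      List.filter_cons_of_pos (by simp [hxmem])
    have c2 : (y :: ys).filter (fun z => !decide (z ∈ x :: xs))
        = (y :: ys).filter (fun z => !decide (z ∈ xs)) :=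
      List.filter_congr (fun z hz => by simp [List.mem_cons, hne z hz])
    have c3 : (x :: xs).filter (fun z => decide (z ∈ y :: ys))
        = xs.filter (fun z => decide (z ∈ y :: ys)) :=
      List.filter_cons_of_neg (by simp [hxmem])
    rw [c1, c2, c3]
    simp only [r, ih hx.tail hy]
  | case4 x xs y ys hlt1 hlt2 r ih =>
    have hyx : ∀ z ∈ x :: xs, y < z := by
      intro z hz
      rcases List.mem_cons.mp hz with rfl | hz
      · exact hlt2
      · exact lt_trans hlt2 (List.rel_of_pairwise_cons hx hz)
    have hne : ∀ z ∈ x :: xs, z ≠ y := fun z hz h => absurd (h ▸ hyx z hz) (lt_irrefl _)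
    have hymem : y ∉ x :: xs := fun h => absurd (hyx y h) (lt_irrefl _)
    have c1 : (x :: xs).filter (fun z => !decide (z ∈ y :: ys))
        = (x :: xs).filter (fun z => !decide (z ∈ ys)) :=
      List.filter_congr (fun z hz => by simp [List.mem_cons, hne z hz])
    have c2 : (y :: ys).filter (fun z => !decide (z ∈ x :: xs))
        = y :: ys.filter (fun z => !decide (z ∈ x :: xs)) :=
      List.filter_cons_of_pos (by simp [hymem])
    have c3 : (x :: xs).filter (fun z => decide (z ∈ y :: ys))
        = (x :: xs).filter (fun z => decide (z ∈ ys)) :=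
      List.filter_congr (fun z hz => by simp [List.mem_cons, hne z hz])
    rw [c1, c2, c3]
    simp only [r, ih hx hy.tail]
  | case5 x xs y ys hlt1 hlt2 r ih =>
    have heq : x = y := le_antisymm (not_lt.mp hlt2) (not_lt.mp hlt1)
    subst heq
    have hxs : ∀ z ∈ xs, z ≠ x := by
      intro z hz h
      exact absurd (h ▸ List.rel_of_pairwise_cons hx hz) (lt_irrefl _)
    have hys : ∀ z ∈ ys, z ≠ x := by
      intro z hz h
      exact absurd (h ▸ List.rel_of_pairwise_cons hy hz) (lt_irrefl _)
    have hxys : x ∉ ys := fun h => absurd (List.rel_of_pairwise_cons hy h) (lt_irrefl _)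
    have hxxs : x ∉ xs := fun h => absurd (List.rel_of_pairwise_cons hx h) (lt_irrefl _)
    have c1 : (x :: xs).filter (fun z => !decide (z ∈ x :: ys))
        = xs.filter (fun z => !decide (z ∈ ys)) := by
      rw [List.filter_cons_of_neg (by simp)]
      exact List.filter_congr (fun z hz => by simp [List.mem_cons, hxs z hz])
    have c2 : (x :: ys).filter (fun z => !decide (z ∈ x :: xs))
        = ys.filter (fun z => !decide (z ∈ xs)) := by
      rw [List.filter_cons_of_neg (by simp)]
      exact List.filter_congr (fun z hz => by simp [List.mem_cons, hys z hz])
    have c3 : (x :: xs).filter (fun z => decide (z ∈ x :: ys))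
        = x :: xs.filter (fun z => decide (z ∈ ys)) := by
      rw [List.filter_cons_of_pos (by simp)]
      exact congrArg _ (List.filter_congr (fun z hz => by simp [List.mem_cons, hxs z hz]))
    rw [c1, c2, c3]
    simp only [r, ih hx.tail hy.tail]

-- a sorted set-operation result is the corresponding filter of the sorted dedup list
lemma pv_sorted_filter (l : List String) (M : PySem.Set String) (p : String → Bool)
    (hM : ∀ x, x ∈ (PySem.List.sorted (PySem.Set.ofList l) (fun x => x) false).filter p ↔ x ∈ M)
    (hMn : M.Nodup) :
    PySem.List.sorted M (fun x => x) false
      = (PySem.List.sorted (PySem.Set.ofList l) (fun x => x) false).filter p := by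
  have hpw := PySem.List.sorted_ofList_pairwise_lt (xs := l)
  apply PySem.List.sorted_eq_of_perm_of_pairwise_lt
  · exact (List.perm_ext_iff_of_nodup (hpw.filter p |>.nodup) hMn).mpr hM
  · exact hpw.filter p

-- ===== VERDICT (by name: the statement is the Claim_ definition above) =====
theorem compare_slots_by_extension_spec : Claim_equal_compare_slots_by_extension := by
  intro pairs ext1 ext2 _hdom _hpre
  unfold Spec_compare_slots_by_extension
  simp only [compare_slots_by_extension, compare_slots_by_extension_alt, pvSorted1, pvSorted2]
  rw [pv_foldA ext1 ext2 pairs PySem.Set.empty PySem.Set.empty]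
  set L1 := (pairs.filter
      (fun item => decide ((PySem.Dict.ofList item).getD "extension" "" = ext1))).map
    (fun item => (PySem.Dict.ofList item).getD "slot" "") with hL1
  set L2 := (pairs.filter
      (fun item => decide (¬ (PySem.Dict.ofList item).getD "extension" "" = ext1 ∧
                   (PySem.Dict.ofList item).getD "extension" "" = ext2))).map
    (fun item => (PySem.Dict.ofList item).getD "slot" "") with hL2
  have hup : ∀ l : List String, PySem.Set.update PySem.Set.empty l = PySem.Set.ofList l :=
    fun l => rfl
  simp only [hup]
  set s1 := PySem.List.sorted (PySem.Set.ofList L1) (fun x => x) false with hs1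
  set s2 := PySem.List.sorted (PySem.Set.ofList L2) (fun x => x) false with hs2
  rw [pv_merge_eq s1 s2 (by rw [hs1]; exact PySem.List.sorted_ofList_pairwise_lt L1)
    (by rw [hs2]; exact PySem.List.sorted_ofList_pairwise_lt L2)]
  have E1 : PySem.List.sorted (PySem.Set.diff (PySem.Set.ofList L1) (PySem.Set.ofList L2)) (fun x => x) false
      = s1.filter (fun x => !decide (x ∈ s2)) := by
    apply pv_sorted_filter
    · intro x
      simp [hs2, List.mem_filter, PySem.List.mem_sorted, PySem.Set.mem_ofList,
        PySem.Set.mem_diff]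
    · exact PySem.Set.nodup_diff _ _ (PySem.Set.nodup_ofList _)
  have E2 : PySem.List.sorted (PySem.Set.diff (PySem.Set.ofList L2) (PySem.Set.ofList L1)) (fun x => x) false
      = s2.filter (fun x => !decide (x ∈ s1)) := by
    apply pv_sorted_filter
    · intro x
      simp [hs1, List.mem_filter, PySem.List.mem_sorted, PySem.Set.mem_ofList,
        PySem.Set.mem_diff]
    · exact PySem.Set.nodup_diff _ _ (PySem.Set.nodup_ofList _)
  have E3 : PySem.List.sorted (PySem.Set.inter (PySem.Set.ofList L1) (PySem.Set.ofList L2)) (fun x => x) false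
      = s1.filter (fun x => decide (x ∈ s2)) := by
    apply pv_sorted_filter
    · intro x
      simp [hs2, List.mem_filter, PySem.List.mem_sorted, PySem.Set.mem_ofList,
        PySem.Set.mem_inter]
    · exact PySem.Set.nodup_inter _ _ (PySem.Set.nodup_ofList _)
  rw [E1, E2, E3]
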